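-- pv_equiv track=rewrite | github.com/felipe-basina/algoritmos | python-alg/algorithms/count_occurrences.py | get_letters_by_total
-- ===== SOURCE A (Python) =====
-- def count_occurrences(string, letter, count):
--     if len(string) == 0:
--         return count
--     else:
--         if string[0] == letter:
--             count += 1
--     return count_occurrences(string[1:], letter, count)
--
-- def get_letters_by_total(list_string, list_letters):
--     letters_by_total = {}
--
--     for letter in list_letters:
--         total = 0
--         for string in list_string:
--             total = count_occurrences(string, letter, total)
--
--         letters_by_total[letter] = total
--
--     return letters_by_total
-- ===== SOURCE B (Python) =====
-- def get_letters_by_total(list_string, list_letters):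
--     totals = {letter: 0 for letter in list_letters}
--     for string in list_string:
--         for ch in string:
--             if ch in totals:
--                 totals[ch] += 1
--     return totals
-- ===== Notes on version B (the rewrite author's own statement) =====
-- stated objective: faster
-- what changed: Instead of rescanning every string once per letter (with per-character recursion), B initializes all letter counts to 0 and makes one combined pass over all characters, incrementing the count of any character that is a wanted key.
import Mathlib
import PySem

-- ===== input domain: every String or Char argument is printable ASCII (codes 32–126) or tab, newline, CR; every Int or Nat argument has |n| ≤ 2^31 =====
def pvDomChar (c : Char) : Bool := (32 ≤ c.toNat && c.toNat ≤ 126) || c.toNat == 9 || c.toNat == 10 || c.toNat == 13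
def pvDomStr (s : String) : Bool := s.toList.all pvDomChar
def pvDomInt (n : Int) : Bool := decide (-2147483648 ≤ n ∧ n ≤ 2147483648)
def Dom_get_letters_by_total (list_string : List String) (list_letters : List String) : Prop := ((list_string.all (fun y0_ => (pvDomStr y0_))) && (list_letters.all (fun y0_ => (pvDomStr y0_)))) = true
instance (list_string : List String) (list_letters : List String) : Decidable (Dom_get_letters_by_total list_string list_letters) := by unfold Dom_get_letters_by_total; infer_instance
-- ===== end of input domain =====

-- B replaces A's per-letter rescans of all strings by a single combined pass over all
-- characters that increments the matching letter's tally (faster: one pass vs L passes).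


-- ===== PORT A =====
-- count_occurrences(string, letter, count): recursion on the characters of the string;
-- string[0] is the 1-character string String.mk [c], string[1:] is the tail.
def count_occurrences (s : List Char) (letter : String) (count : Int) : Int :=
  match s with
  | [] => count
  | c :: rest =>
      count_occurrences rest letter (if String.mk [c] == letter then count + 1 else count)

def get_letters_by_total (list_string : List String) (list_letters : List String) : List (String × Int) :=
  (list_letters.foldl
      (fun d letter =>
        d.insert letter
          (list_string.foldl (fun total s => count_occurrences s.toList letter total) 0))
      PySem.Dict.empty).items

-- ===== PORT B =====
def get_letters_by_total_alt (list_string : List String) (list_letters : List String) : List (String × Int) :=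
  let totals0 : PySem.Dict String Int :=
    list_letters.foldl (fun d letter => d.insert letter 0) PySem.Dict.empty
  (list_string.foldl
      (fun d s =>
        s.toList.foldl
          (fun d c =>
            if d.contains (String.mk [c]) then d.modify (String.mk [c]) 0 (· + 1) else d)
          d)
      totals0).items

-- ===== PRECONDITION & SPEC =====
def Spec_get_letters_by_total (list_string : List String) (list_letters : List String) (out : List (String × Int)) : Prop := out = get_letters_by_total_alt list_string list_letters
instance (list_string : List String) (list_letters : List String) (out : List (String × Int)) : Decidable (Spec_get_letters_by_total list_string list_letters out) := by unfold Spec_get_letters_by_total; infer_instance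

-- ===== CLAIM (what is proved, stated in full; the proofs are below) =====
def Claim_equal_get_letters_by_total : Prop := ∀ (list_string : List String) (list_letters : List String), Dom_get_letters_by_total list_string list_letters → Spec_get_letters_by_total list_string list_letters (get_letters_by_total list_string list_letters)

-- ===== LEMMAS AND PROOFS =====

-- the B-side inner (per-character) loop body
def pvStepC (d : PySem.Dict String Int) (c : Char) : PySem.Dict String Int :=
  if d.contains (String.mk [c]) then d.modify (String.mk [c]) 0 (· + 1) else d

-- count_occurrences adds the number of matching characters
theorem count_occurrences_eq (s : List Char) (letter : String) (count : Int) :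
    count_occurrences s letter count
      = count + (s.countP (fun c => String.mk [c] == letter) : Int) := by
  induction s generalizing count with
  | nil => simp [count_occurrences]
  | cons c rest ih =>
      simp only [count_occurrences, ih, List.countP_cons]
      split_ifs <;> push_cast <;> omega

-- A's per-letter value is the total matching-character count over all strings
theorem loopA_eq (list_string : List String) (letter : String) (t : Int) :
    list_string.foldl (fun total s => count_occurrences s.toList letter total) t
      = t + ((list_string.map
              (fun s => (s.toList.countP (fun c => String.mk [c] == letter) : Int))).sum) := by
  induction list_string generalizing t with
  | nil => simp
  | cons s rest ih =>
      rw [List.foldl_cons, ih, count_occurrences_eq]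
      simp only [List.map_cons, List.sum_cons]
      ring

-- getD through a foldl of inserts with a value function independent of the dict
theorem getD_foldl_insert_fn (l : List String) (f : String → Int)
    (d : PySem.Dict String Int) (k : String) :
    (l.foldl (fun d x => d.insert x (f x)) d).getD k 0
      = if k ∈ l then f k else d.getD k 0 := by
  induction l generalizing d with
  | nil => simp
  | cons x t ih =>
      simp only [List.foldl_cons, ih, PySem.Dict.getD_insert, List.mem_cons]
      by_cases hk : k ∈ t <;> by_cases hx : k = x <;> simp [hk, hx]

-- pvStepC does not change which keys are present
theorem contains_pvStepC (d : PySem.Dict String Int) (c : Char) (k : String) :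
    (pvStepC d c).contains k = d.contains k := by
  unfold pvStepC
  split_ifs with h
  · rw [PySem.Dict.contains_modify]
    by_cases hk : k = String.mk [c]
    · subst hk; simp [h]
    · simp [hk]
  · rfl

theorem contains_charLoop (cs : List Char) (d : PySem.Dict String Int) (k : String) :
    (cs.foldl pvStepC d).contains k = d.contains k := by
  induction cs generalizing d with
  | nil => rfl
  | cons c rest ih => simp [List.foldl_cons, ih, contains_pvStepC]

-- effect of the per-character loop on one entry
theorem getD_charLoop (cs : List Char) (d : PySem.Dict String Int) (k : String) :
    (cs.foldl pvStepC d).getD k 0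
      = d.getD k 0
        + (if d.contains k then (cs.countP (fun c => String.mk [c] == k) : Int) else 0) := by
  induction cs generalizing d with
  | nil => simp
  | cons c rest ih =>
      simp only [List.foldl_cons, ih, List.countP_cons, contains_pvStepC]
      by_cases hm : String.mk [c] = k
      · subst hm
        by_cases hc : d.contains (String.mk [c])
        · simp only [pvStepC, hc, if_true, PySem.Dict.getD_modify_self]
          simp
          push_cast
          ring
        · have hc' : d.contains (String.mk [c]) = false := by simpa using hc
          simp [pvStepC, hc']
      · have hne : (String.mk [c] == k) = false := by simp [hm]
        have hstep : (pvStepC d c).getD k 0 = d.getD k 0 := by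
          unfold pvStepC
          split_ifs with hc
          · exact PySem.Dict.getD_modify_of_ne d 0 _ (Ne.symm hm)
          · rfl
        rw [hstep]
        simp [hne]

-- effect of the whole string loop on one entry
theorem getD_stringLoop (ls : List String) (d : PySem.Dict String Int) (k : String) :
    (ls.foldl (fun d s => s.toList.foldl pvStepC d) d).getD k 0
      = d.getD k 0
        + (if d.contains k then
            ((ls.map (fun s => (s.toList.countP (fun c => String.mk [c] == k) : Int))).sum)
           else 0) := by
  induction ls generalizing d with
  | nil => simp
  | cons s rest ih =>
      simp only [List.foldl_cons, ih, getD_charLoop, List.map_cons, List.sum_cons,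
        contains_charLoop]
      by_cases hdk : d.contains k <;> simp [hdk] <;> ring

-- the string loop does not change the key list
theorem keys_stringLoop (ls : List String) (d : PySem.Dict String Int) :
    (ls.foldl (fun d s => s.toList.foldl pvStepC d) d).keys = d.keys := by
  induction ls generalizing d with
  | nil => rfl
  | cons s rest ih =>
      rw [List.foldl_cons, ih]
      induction s.toList generalizing d with
      | nil => rfl
      | cons c cs ihc =>
          rw [List.foldl_cons, ihc]
          unfold pvStepC
          split_ifs with hc
          · rw [PySem.Dict.keys_modify, PySem.Dict.keys_insert_of_contains _ _ hc]
          · rfl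

theorem get_letters_by_total_eq_alt (list_string : List String) (list_letters : List String) :
    get_letters_by_total list_string list_letters
      = get_letters_by_total_alt list_string list_letters := by
  unfold get_letters_by_total get_letters_by_total_alt
  show (list_letters.foldl (fun d letter => d.insert letter
          (list_string.foldl (fun total s => count_occurrences s.toList letter total) 0))
          PySem.Dict.empty).items
      = (list_string.foldl (fun d s => s.toList.foldl pvStepC d)
          (list_letters.foldl (fun d letter => d.insert letter 0) PySem.Dict.empty)).items
  set dA : PySem.Dict String Int := list_letters.foldl (fun d letter => d.insert letter
      (list_string.foldl (fun total s => count_occurrences s.toList letter total) 0))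
      PySem.Dict.empty with hdA
  set d0 : PySem.Dict String Int :=
    list_letters.foldl (fun d letter => d.insert letter (0:Int)) PySem.Dict.empty with hd0
  set dB : PySem.Dict String Int :=
    list_string.foldl (fun d s => s.toList.foldl pvStepC d) d0 with hdB
  have hkA : dA.keys = PySem.Set.update (PySem.Dict.empty : PySem.Dict String Int).keys list_letters := by
    rw [hdA]; exact PySem.Dict.keys_foldl_insert list_letters _ _
  have hk0 : d0.keys = PySem.Set.update (PySem.Dict.empty : PySem.Dict String Int).keys list_letters := by
    rw [hd0]; exact PySem.Dict.keys_foldl_insert list_letters _ _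
  have hkB : dB.keys = d0.keys := keys_stringLoop _ _
  have hkeys : dA.keys = dB.keys := by rw [hkA, hkB, hk0]
  have hndA : dA.keys.Nodup := by
    rw [hdA]
    exact PySem.Dict.nodup_keys_foldl_insert _ _ _ PySem.Dict.nodup_keys_empty
  have hndB : dB.keys.Nodup := by rw [← hkeys]; exact hndA
  have hmemA : ∀ k, k ∈ dA.keys ↔ k ∈ list_letters := by
    intro k
    rw [hkA, PySem.Set.mem_update]
    simp [PySem.Dict.keys_empty]
  have hcont0 : ∀ k, d0.contains k = decide (k ∈ list_letters) := by
    intro k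
    rw [PySem.Dict.contains_eq_decide_mem_keys, hk0, ← hkA]
    simp [hmemA k]
  have hvals : ∀ k ∈ dA.keys, dA.getD k 0 = dB.getD k 0 := by
    intro k hk
    have hkl : k ∈ list_letters := (hmemA k).1 hk
    rw [hdA, getD_foldl_insert_fn, if_pos hkl, hdB, getD_stringLoop, hcont0 k,
        loopA_eq list_string k 0]
    have h0 : d0.getD k 0 = 0 := by
      rw [hd0, getD_foldl_insert_fn]
      split_ifs <;> rfl
    simp [hkl, h0]
  rw [PySem.Dict.items_eq_map_keys dA hndA 0, PySem.Dict.items_eq_map_keys dB hndB 0, hkeys]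
  exact List.map_congr_left fun k hk =>
    by rw [hvals k (by rw [hkeys]; exact hk)]

-- ===== VERDICT (by name: the statement is the Claim_ definition above) =====
theorem get_letters_by_total_spec : Claim_equal_get_letters_by_total := by
  intro ls ll _
  unfold Spec_get_letters_by_total
  exact get_letters_by_total_eq_alt ls ll
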